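-- pv_equiv track=rewrite | github.com/sschmerda/ddia_dataset_analysis | dataset_analysis/utilities/cluster_eval_metric_omnibus_tests.py | _transform_label
-- ===== SOURCE A (Python) =====
-- def _transform_label(
--                      label: str,
--                      split_by_str: str,
--                      words_per_line: int) -> str:
--
--     n_words_label = len(label.split(split_by_str))
--
--     if n_words_label > words_per_line:
--
--         label_words = label.split(split_by_str)
--
--         label = ''
--         for n, word in enumerate(label_words):
--
--             if n == 0:
--                 label += word
--             elif n % words_per_line == 0:
--                 word = '\n' + word
--                 label += word
--             else:
--                 word = split_by_str + word
--                 label += word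
--
--     return label
-- ===== SOURCE B (Python) =====
-- def _transform_label(label: str, split_by_str: str, words_per_line: int) -> str:
--     words = label.split(split_by_str)
--     if len(words) <= words_per_line:
--         return label
--     return '\n'.join(split_by_str.join(words[i:i + words_per_line])
--                      for i in range(0, len(words), words_per_line))
-- ===== Notes on version B (the rewrite author's own statement) =====
-- stated objective: simpler
-- what changed: B replaces A's index-modulo accumulation loop (branching on n % words_per_line inside a single string-building pass) by a two-level group-then-join decomposition: split once, slice the word list into chunks of words_per_line, join each chunk with split_by_str and join the chunks with newline.
-- outside the precondition, e.g. on _transform_label('a b', ' ', -1): A returns 'a\nb', B returns ''; on _transform_label('ab', ' ', 0): A returns 'ab', B raises ValueError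
import Mathlib
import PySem

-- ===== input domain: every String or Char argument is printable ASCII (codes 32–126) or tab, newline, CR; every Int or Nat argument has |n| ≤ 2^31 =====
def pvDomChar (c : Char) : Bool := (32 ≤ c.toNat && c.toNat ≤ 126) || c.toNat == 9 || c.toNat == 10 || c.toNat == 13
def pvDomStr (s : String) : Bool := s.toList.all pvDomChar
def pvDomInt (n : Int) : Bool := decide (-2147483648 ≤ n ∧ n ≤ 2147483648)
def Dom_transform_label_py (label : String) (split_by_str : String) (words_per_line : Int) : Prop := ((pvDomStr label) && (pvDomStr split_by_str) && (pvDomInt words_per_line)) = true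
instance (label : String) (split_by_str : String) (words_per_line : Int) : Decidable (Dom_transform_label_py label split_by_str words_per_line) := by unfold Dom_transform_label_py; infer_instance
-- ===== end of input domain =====

-- B: group-then-join decomposition (split once, chunk, join) instead of A's index-modulo accumulation loop; objective: simpler.
-- Pre_ restricts to sep ≠ "" (A raises ValueError on "") and words_per_line ≥ 1, the task's natural domain: A raises
-- ZeroDivisionError at words_per_line = 0 on multi-word labels, and its negative-words_per_line behaviour is accidental.


-- ===== PORT A =====
-- literal transliteration of A: split, count, and if n_words > words_per_line rebuild by an
-- enumerate-fold appending word / '\n'+word / sep+word according to n == 0 / n % wpl == 0.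
def transform_label_py (label : String) (split_by_str : String) (words_per_line : Int) : String :=
  match PySem.Chars.split? label.toList split_by_str.toList with
  | none => label  -- sep = "": Python raises ValueError; excluded by Pre_
  | some label_words =>
    if (label_words.length : Int) > words_per_line then
      String.ofList ((PySem.List.enumerate label_words 0).foldl (fun acc p =>
        if p.1 = 0 then acc ++ p.2
        else if PySem.Int.mod p.1 words_per_line = 0 then acc ++ ('\n' :: p.2)
        else acc ++ (split_by_str.toList ++ p.2)) [])
    else label

-- ===== PORT B =====
-- B's chunking loop `words[i:i+wpl] for i in range(0, len(words), wpl)` as structural recursion (wpl ≥ 1 under Pre_)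
def pvChunks (k : Nat) (ws : List (List Char)) : List (List (List Char)) :=
  match ws with
  | [] => []
  | w :: rest => (w :: rest.take (k - 1)) :: pvChunks k (rest.drop (k - 1))
termination_by ws.length
decreasing_by simp

def transform_label_py_alt (label : String) (split_by_str : String) (words_per_line : Int) : String :=
  match PySem.Chars.split? label.toList split_by_str.toList with
  | none => label  -- sep = "": Python raises ValueError; excluded by Pre_
  | some words =>
    if (words.length : Int) ≤ words_per_line then label
    else if words_per_line < 0 then String.ofList []  -- range(0, len, step) with step < 0 is empty: '\n'.join of no chunks
    else String.ofList (PySem.Chars.join ['\n']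
      ((pvChunks words_per_line.toNat words).map (PySem.Chars.join split_by_str.toList)))

-- ===== PRECONDITION & SPEC =====
-- Pre_ excludes split_by_str = "" (A raises ValueError) and words_per_line ≤ 0: A raises ZeroDivisionError at
-- words_per_line = 0 whenever the label has ≥ 2 words, and on the remaining non-positive values (still returned
-- by A) the inputs lie outside the function's natural domain, so Pre_ restricts to words_per_line ≥ 1.
def Pre_transform_label_py (label : String) (split_by_str : String) (words_per_line : Int) : Prop :=
  split_by_str ≠ "" ∧ 1 ≤ words_per_line
instance (label : String) (split_by_str : String) (words_per_line : Int) : Decidable (Pre_transform_label_py label split_by_str words_per_line) := by unfold Pre_transform_label_py; infer_instance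

def pvWitness_transform_label_py : String × String × Int := ("one two three", " ", 2)

def Spec_transform_label_py (label : String) (split_by_str : String) (words_per_line : Int) (out : String) : Prop := out = transform_label_py_alt label split_by_str words_per_line
instance (label : String) (split_by_str : String) (words_per_line : Int) (out : String) : Decidable (Spec_transform_label_py label split_by_str words_per_line out) := by unfold Spec_transform_label_py; infer_instance

-- ===== CLAIM (what is proved, stated in full; the proofs are below) =====
def Claim_equal_transform_label_py : Prop := ∀ (label : String) (split_by_str : String) (words_per_line : Int), Dom_transform_label_py label split_by_str words_per_line → Pre_transform_label_py label split_by_str words_per_line → Spec_transform_label_py label split_by_str words_per_line (transform_label_py label split_by_str words_per_line)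

-- ===== LEMMAS AND PROOFS =====

-- the body of A's fold
def pvG (sep : List Char) (wpl : Int) (p : Int × List Char) : List Char :=
  if p.1 = 0 then p.2
  else if PySem.Int.mod p.1 wpl = 0 then '\n' :: p.2
  else sep ++ p.2

-- join with a single separator word, cons form
theorem pvJoin_cons (sep : List Char) (w : List Char) (l : List (List Char)) :
    PySem.Chars.join sep (w :: l) = w ++ l.flatMap (fun x => sep ++ x) := by
  induction l generalizing w with
  | nil => simp [PySem.Chars.join_singleton]
  | cons b t ih => simp [PySem.Chars.join_cons_cons, ih]

-- a run of indices none of which is ≡ 0 (mod wpl) contributes sep ++ word each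
theorem pvSepRun (sep : List Char) (k : Nat) (hk : 1 ≤ k) (l : List (List Char)) (base : Nat)
    (h : ∀ j < l.length, (base + j) % k ≠ 0) :
    (PySem.List.enumerate l (base : Int)).flatMap (pvG sep (k : Int))
      = l.flatMap (fun w => sep ++ w) := by
  induction l generalizing base with
  | nil => simp [PySem.List.enumerate_nil]
  | cons w t ih =>
    have h0 : base % k ≠ 0 := by simpa using h 0 (by simp)
    have hb : base ≠ 0 := by intro e; exact h0 (by simp [e])
    rw [PySem.List.enumerate_cons]
    have : ((base : Int) + 1) = ((base + 1 : Nat) : Int) := by push_cast; ring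
    simp only [List.flatMap_cons, this]
    rw [ih (base + 1) (by
      intro j hj
      rw [show base + 1 + j = base + (j + 1) from by omega]
      exact h (j + 1) (by simpa using hj))]
    have hcast : PySem.Int.mod (base : Int) (k : Int) = ((base % k : Nat) : Int) :=
      PySem.Int.mod_natCast base k
    simp only [pvG, hcast]
    rw [if_neg (by exact_mod_cast hb), if_neg (by exact_mod_cast h0)]

-- main lemma: from any chunk-start q*k with q ≥ 1, A's tail is the '\n'-prefixed chunk strings
theorem pvMain (sep : List Char) (k : Nat) (hk : 1 ≤ k) (ws : List (List Char)) (q : Nat) (hq : 1 ≤ q) :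
    (PySem.List.enumerate ws ((q * k : Nat) : Int)).flatMap (pvG sep (k : Int))
      = (pvChunks k ws).flatMap (fun c => '\n' :: PySem.Chars.join sep c) := by
  induction hn : ws.length using Nat.strong_induction_on generalizing ws q with
  | _ n ih =>
  match ws with
  | [] => simp [PySem.List.enumerate_nil, pvChunks]
  | w :: rest =>
    have hqk0 : q * k ≠ 0 := by positivity
    have hqmod : (q * k) % k = 0 := by simp
    have hcast : PySem.Int.mod ((q * k : Nat) : Int) (k : Int) = (((q * k) % k : Nat) : Int) :=
      PySem.Int.mod_natCast (q * k) k
    have hg1 : pvG sep (k : Int) (((q * k : Nat) : Int), w) = '\n' :: w := by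
      simp only [pvG, hcast]
      rw [if_neg (by exact_mod_cast hqk0), if_pos (by exact_mod_cast hqmod)]
    have hkey : ∀ j, j < k - 1 → (q * k + 1 + j) % k ≠ 0 := by
      intro j hj
      rw [show q * k + 1 + j = (1 + j) + q * k from by ring, Nat.add_mul_mod_self_right,
          Nat.mod_eq_of_lt (by omega)]
      omega
    rw [PySem.List.enumerate_cons]
    rw [show (PySem.List.enumerate rest (((q * k : Nat) : Int) + 1)) = PySem.List.enumerate (rest.take (k-1) ++ rest.drop (k-1)) (((q * k : Nat) : Int) + 1) from by rw [List.take_append_drop]]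
    rw [PySem.List.enumerate_append, List.flatMap_cons, List.flatMap_append, hg1]
    have hc1 : ((q * k : Nat) : Int) + 1 = ((q * k + 1 : Nat) : Int) := by push_cast; ring
    rw [hc1, pvSepRun sep k hk (rest.take (k-1)) (q*k+1) (by
          intro j hj
          exact hkey j (lt_of_lt_of_le hj (by simpa using List.length_take_le (k-1) rest)))]
    by_cases hlen : rest.length ≤ k - 1
    · have hdrop : rest.drop (k - 1) = [] := List.drop_eq_nil_of_le (by omega)
      simp [hdrop, pvChunks, PySem.List.enumerate_nil, pvJoin_cons, List.take_of_length_le hlen]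
    · have htk : (rest.take (k-1)).length = k - 1 := by simp; omega
      have hnext : ((q * k + 1 : Nat) : Int) + ((rest.take (k-1)).length : Int) = (((q+1) * k : Nat) : Int) := by
        rw [htk]; push_cast [Nat.add_mul]; omega
      rw [hnext, ih (rest.drop (k-1)).length (by
            subst hn; simp only [List.length_drop, List.length_cons]; omega)
          (rest.drop (k-1)) (q+1) (by omega) rfl]
      simp [pvChunks, pvJoin_cons]

-- top-level fold → flatMap over enumerate
theorem pvFoldl (sep : List Char) (wpl : Int) (l : List (Int × List Char)) (acc : List Char) :
    l.foldl (fun acc p =>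
        if p.1 = 0 then acc ++ p.2
        else if PySem.Int.mod p.1 wpl = 0 then acc ++ ('\n' :: p.2)
        else acc ++ (sep ++ p.2)) acc
      = acc ++ l.flatMap (pvG sep wpl) := by
  induction l generalizing acc with
  | nil => simp
  | cons p t ih => simp only [List.foldl_cons, List.flatMap_cons, ih]; unfold pvG; split_ifs <;> simp

-- ===== VERDICT (by name: the statement is the Claim_ definition above) =====
theorem transform_label_py_spec : Claim_equal_transform_label_py := by
  intro label sep wpl _ hpre
  obtain ⟨hsep, hwpl⟩ := hpre
  unfold Spec_transform_label_py transform_label_py transform_label_py_alt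
  have hsep' : sep.toList ≠ [] := by
    intro h; exact hsep (by cases sep; simp_all)
  obtain ⟨k, hk1, hkeq⟩ : ∃ k : Nat, 1 ≤ k ∧ wpl = (k : Int) :=
    ⟨wpl.toNat, by omega, by omega⟩
  subst hkeq
  cases hsp : PySem.Chars.split? label.toList sep.toList with
  | none => rfl
  | some ws =>
    simp only
    by_cases hgt : (ws.length : Int) > (k : Int)
    · rw [if_pos hgt, if_neg (by omega), if_neg (by omega)]
      congr 1
      rw [pvFoldl, List.nil_append]
      match ws with
      | [] => exact absurd hgt (by simp)
      | w :: rest =>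
        have hrest : ¬ rest.length ≤ k - 1 := by
          simp only [List.length_cons] at hgt
          have : k < rest.length + 1 := by exact_mod_cast hgt
          omega
        have hkey : ∀ j, j < k - 1 → (1 + j) % k ≠ 0 := by
          intro j hj
          rw [Nat.mod_eq_of_lt (by omega)]; omega
        rw [show (PySem.List.enumerate (w :: rest) 0) = PySem.List.enumerate (w :: (rest.take (k-1) ++ rest.drop (k-1))) 0 from by rw [List.take_append_drop]]
        rw [show (w :: (rest.take (k-1) ++ rest.drop (k-1))) = ([w] ++ rest.take (k-1)) ++ rest.drop (k-1) from by simp]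
        rw [PySem.List.enumerate_append, PySem.List.enumerate_append, List.flatMap_append, List.flatMap_append]
        rw [PySem.List.enumerate_cons, PySem.List.enumerate_nil, List.flatMap_cons, List.flatMap_nil]
        have hg0 : pvG sep.toList (k : Int) ((0 : Int), w) = w := by simp [pvG]
        rw [hg0]
        have hsr := pvSepRun sep.toList k hk1 (rest.take (k-1)) 1 (by
          intro j hj
          exact hkey j (lt_of_lt_of_le hj (by simpa using List.length_take_le (k-1) rest)))
        simp only [Nat.cast_one] at hsr
        have htk : (rest.take (k-1)).length = k - 1 := by simp; omega
        have e1 : (0:Int) + (([w].length : Nat) : Int) = 1 := by simp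
        have e2 : (0:Int) + ((([w] ++ rest.take (k-1)).length : Nat) : Int) = ((1 * k : Nat) : Int) := by
          simp [htk]; omega
        rw [e1, hsr, e2]
        rw [pvMain sep.toList k hk1 (rest.drop (k-1)) 1 le_rfl]
        simp only [Int.toNat_natCast]
        rw [show pvChunks k (w :: rest) = (w :: rest.take (k-1)) :: pvChunks k (rest.drop (k-1)) from by rw [pvChunks]]
        simp only [List.map_cons]
        rw [pvJoin_cons ['\n'], pvJoin_cons sep.toList]
        simp [List.flatMap_map]
    · rw [if_neg hgt, if_pos (by omega)]
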